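-- pv_equiv track=rewrite | github.com/xination/simple_crush_py | crush_py/agent/trace_runtime_file_flow.py | first_output_line
-- ===== SOURCE A (Python) =====
-- from typing import Any, Dict, List
--
-- def first_output_line(cat_lines: List[str]) -> str:
--     for code in cat_lines:
--         if code.startswith("return ") and ("join(" in code or "format(" in code or "_single_line" in code):
--             return "`{0}`".format(code)
--     for code in cat_lines:
--         if code.startswith("return "):
--             return "`{0}`".format(code)
--     return ""
-- ===== SOURCE B (Python) =====
-- def first_output_line(cat_lines):
--     fallback = None
--     for code in cat_lines:
--         if code.startswith("return ") and ("join(" in code or "format(" in code or "_single_line" in code):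
--             return "`{0}`".format(code)
--         if code.startswith("return ") and fallback is None:
--             fallback = code
--     return "`{0}`".format(fallback) if fallback is not None else ""
-- ===== Notes on version B (the rewrite author's own statement) =====
-- stated objective: simpler
-- what changed: Replaced A's two sequential scans of cat_lines with a single pass that remembers the first plain 'return ' line as a fallback while returning a preferred line immediately.
import Mathlib
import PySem

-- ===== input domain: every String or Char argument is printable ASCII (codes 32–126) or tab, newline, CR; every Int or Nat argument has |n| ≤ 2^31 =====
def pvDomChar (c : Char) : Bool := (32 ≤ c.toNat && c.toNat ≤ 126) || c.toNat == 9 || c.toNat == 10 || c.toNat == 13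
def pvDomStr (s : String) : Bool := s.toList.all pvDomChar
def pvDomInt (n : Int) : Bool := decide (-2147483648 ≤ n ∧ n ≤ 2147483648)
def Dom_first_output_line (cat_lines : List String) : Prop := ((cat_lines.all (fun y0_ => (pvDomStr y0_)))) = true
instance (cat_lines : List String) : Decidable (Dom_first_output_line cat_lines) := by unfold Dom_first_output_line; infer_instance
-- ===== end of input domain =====

-- B replaces A's two sequential scans with one pass that keeps the first plain 'return ' line as a fallback (simpler, single traversal).

-- ===== PORT A =====
-- the preferred-line test of A's first loop
def pvPref (code : String) : Bool :=
  PySem.Str.startswith code "return " &&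
    (PySem.Str.isIn "join(" code || PySem.Str.isIn "format(" code || PySem.Str.isIn "_single_line" code)

-- "`{0}`".format(code): str.format with a plain string argument is concatenation (exact)
def pvFmt (code : String) : String := "`" ++ code ++ "`"

-- A's first loop
def pvLoop1 : List String → Option String
  | [] => none
  | code :: rest => if pvPref code then some (pvFmt code) else pvLoop1 rest

-- A's second loop
def pvLoop2 : List String → Option String
  | [] => none
  | code :: rest => if PySem.Str.startswith code "return " then some (pvFmt code) else pvLoop2 rest

def first_output_line (cat_lines : List String) : String :=
  match pvLoop1 cat_lines with
  | some s => s
  | none =>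
    match pvLoop2 cat_lines with
    | some s => s
    | none => ""

-- ===== PORT B =====
-- B's single loop, carrying the fallback variable
def pvLoopB : List String → Option String → String
  | [], none => ""
  | [], some f => "`" ++ f ++ "`"
  | code :: rest, fb =>
    if PySem.Str.startswith code "return " &&
        (PySem.Str.isIn "join(" code || PySem.Str.isIn "format(" code || PySem.Str.isIn "_single_line" code) then
      "`" ++ code ++ "`"
    else if PySem.Str.startswith code "return " && fb.isNone then
      pvLoopB rest (some code)
    else
      pvLoopB rest fb

def first_output_line_alt (cat_lines : List String) : String := pvLoopB cat_lines none

-- ===== PRECONDITION & SPEC =====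
def Spec_first_output_line (cat_lines : List String) (out : String) : Prop := out = first_output_line_alt cat_lines
instance (cat_lines : List String) (out : String) : Decidable (Spec_first_output_line cat_lines out) := by unfold Spec_first_output_line; infer_instance

-- ===== CLAIM (what is proved, stated in full; the proofs are below) =====
def Claim_equal_first_output_line : Prop := ∀ (cat_lines : List String), Dom_first_output_line cat_lines → Spec_first_output_line cat_lines (first_output_line cat_lines)

-- ===== LEMMAS AND PROOFS =====

-- invariant of B's loop: with fallback fb it computes A's preferred scan, then fb, then A's plain scan
theorem pvLoopB_eq (ls : List String) : ∀ fb : Option String,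
    pvLoopB ls fb =
      (match pvLoop1 ls with
       | some s => s
       | none =>
         match fb with
         | some f => pvFmt f
         | none =>
           match pvLoop2 ls with
           | some s => s
           | none => "") := by
  induction ls with
  | nil => intro fb; cases fb <;> rfl
  | cons code rest ih =>
    intro fb
    cases hP : (PySem.Str.startswith code "return " &&
        (PySem.Str.isIn "join(" code || PySem.Str.isIn "format(" code ||
         PySem.Str.isIn "_single_line" code)) with
    | true =>
      simp only [pvLoopB, pvLoop1, pvPref, pvFmt, hP, if_true]
    | false =>
      cases hR : PySem.Str.startswith code "return " with
      | true =>
        rw [hR, Bool.true_and] at hP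
        cases fb with
        | none =>
          simp only [pvLoopB, pvLoop1, pvLoop2, pvPref, pvFmt, hP, hR,
            Option.isNone_none, Bool.true_and, ih]
          simp
        | some f =>
          simp only [pvLoopB, pvLoop1, pvPref, pvFmt, hP, hR,
            Option.isNone_some, Bool.and_false, ih]
          simp
      | false =>
        cases fb with
        | none =>
          simp only [pvLoopB, pvLoop1, pvLoop2, pvPref, pvFmt, hR,
            Option.isNone_none, Bool.false_and, ih]
          simp
        | some f =>
          simp only [pvLoopB, pvLoop1, pvPref, pvFmt, hR,
            Option.isNone_some, Bool.false_and, ih]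
          simp

-- ===== VERDICT (by name: the statement is the Claim_ definition above) =====
theorem first_output_line_spec : Claim_equal_first_output_line := by
  intro cat_lines _
  unfold Spec_first_output_line first_output_line first_output_line_alt
  rw [pvLoopB_eq]
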